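-- pv_equiv track=rewrite | github.com/takapdayon/atcoder | python/_abc/AtCoderBeginnerContest122/B.py | atcoder
-- ===== SOURCE A (Python) =====
-- def atcoder(s):
--
--     ans = 0
--     count = 0
--     acgt = ["A", "C", "G", "T"]
--
--     for i in s:
--         if i in acgt:
--             count += 1
--         else:
--             count = 0
--         ans = max(ans, count)
--     return ans
-- ===== SOURCE B (Python) =====
-- def atcoder(s):
--     chars = list(s)
--     acgt = {"A", "C", "G", "T"}
--     best = 0
--     i, n = 0, len(chars)
--     while i < n:
--         if chars[i] in acgt:
--             j = i
--             while j < n and chars[j] in acgt: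
--                 j += 1
--             best = max(best, j - i)
--             i = j
--         else:
--             i += 1
--     return best
-- ===== Notes on version B (the rewrite author's own statement) =====
-- stated objective: alternative
-- what changed: Replaces the per-character running-counter/reset-and-update-max scan with a run decomposition: an outer scan that, on hitting an ACGT character, measures the whole maximal ACGT run at once (inner scan) and takes the max of run lengths; this drops the per-character max/ans update (constant-factor win).
import Mathlib
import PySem

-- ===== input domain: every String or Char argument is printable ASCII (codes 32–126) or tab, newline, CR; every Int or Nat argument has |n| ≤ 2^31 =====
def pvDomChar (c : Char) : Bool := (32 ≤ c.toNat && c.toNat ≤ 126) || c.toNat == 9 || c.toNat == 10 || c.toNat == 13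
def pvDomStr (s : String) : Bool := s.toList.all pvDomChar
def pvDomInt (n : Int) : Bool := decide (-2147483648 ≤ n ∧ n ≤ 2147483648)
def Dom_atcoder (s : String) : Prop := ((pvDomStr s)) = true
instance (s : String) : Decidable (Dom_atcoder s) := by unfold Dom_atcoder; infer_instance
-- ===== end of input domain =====

-- B replaces A's per-character counter/reset/max scan by a run decomposition (measure each
-- maximal ACGT run at once); same O(n) cost, alternative structure.

-- ===== PORT A =====
-- A's loop: state (ans, count); count incremented on ACGT else reset; ans = max ans count each step.
def atcoder (s : String) : Int :=
  let acgt : List Char := ['A', 'C', 'G', 'T']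
  let r := s.toList.foldl
    (fun (st : Int × Int) (i : Char) =>
      let count := if i ∈ acgt then st.2 + 1 else 0
      (max st.1 count, count))
    (0, 0)
  r.1

-- ===== PORT B =====
-- B's key test: membership in the set {"A","C","G","T"}.
def altKey (c : Char) : Bool := PySem.Set.contains (PySem.Set.ofList ['A', 'C', 'G', 'T']) c

-- B's outer while-loop: on an ACGT character scan to the end of the run (inner while = takeWhile /
-- dropWhile), update best with the run length, continue after the run; else advance one character.
def altGo (l : List Char) (best : Int) : Int :=
  match l with
  | [] => best
  | c :: t =>
    if altKey c then
      altGo (t.dropWhile altKey) (max best (1 + (t.takeWhile altKey).length))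
    else
      altGo t best
termination_by l.length
decreasing_by
  · simpa using Nat.lt_succ_of_le (List.length_dropWhile_le altKey t)
  · simp

def atcoder_alt (s : String) : Int := altGo s.toList 0

-- ===== PRECONDITION & SPEC =====
def Spec_atcoder (s : String) (out : Int) : Prop := out = atcoder_alt s
instance (s : String) (out : Int) : Decidable (Spec_atcoder s out) := by unfold Spec_atcoder; infer_instance

-- ===== CLAIM (what is proved, stated in full; the proofs are below) =====
def Claim_equal_atcoder : Prop := ∀ (s : String), Dom_atcoder s → Spec_atcoder s (atcoder s)

-- ===== LEMMAS AND PROOFS =====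

-- the two key tests agree
theorem key_eq (c : Char) : (decide (c ∈ (['A', 'C', 'G', 'T'] : List Char))) = altKey c := by
  simp [altKey, PySem.Set.contains, PySem.Set.ofList, PySem.Set.add]

-- bridge function: gAux count l = the final max run value given current run length count
def gAux (count : Int) (l : List Char) : Int :=
  match l with
  | [] => count
  | c :: t => if altKey c then gAux (count + 1) t else max count (gAux 0 t)

theorem gAux_ge (l : List Char) : ∀ count : Int, count ≤ gAux count l := by
  induction l with
  | nil => intro count; simp [gAux]
  | cons c t ih =>
    intro count
    by_cases h : altKey c
    · simpa [gAux, h] using le_trans (by omega) (ih (count + 1))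
    · simp [gAux, h]

-- A's fold computes max ans (gAux count l) under the loop invariant 0 ≤ count ≤ ans
theorem foldA_eq (l : List Char) : ∀ (ans count : Int), 0 ≤ count → count ≤ ans →
    (l.foldl (fun (st : Int × Int) (i : Char) =>
      let count := if i ∈ (['A', 'C', 'G', 'T'] : List Char) then st.2 + 1 else 0
      (max st.1 count, count)) (ans, count)).1 = max ans (gAux count l) := by
  induction l with
  | nil => intro ans count h0 h1; simp [gAux]; omega
  | cons c t ih =>
    intro ans count h0 h1
    by_cases h : c ∈ (['A', 'C', 'G', 'T'] : List Char)
    · have hk : altKey c = true := by rw [← key_eq]; simpa using h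
      have := ih (max ans (count + 1)) (count + 1) (by omega) (by omega)
      simp only [List.foldl_cons, h, if_true] at this ⊢
      rw [this, gAux, hk, if_pos rfl]
      have := gAux_ge t (count + 1)
      omega
    · have hk : altKey c = false := by rw [← key_eq]; simpa using h
      have := ih (max ans 0) 0 le_rfl (by omega)
      simp only [List.foldl_cons, h, if_false] at this ⊢
      rw [this, gAux, hk]
      have := gAux_ge t 0
      simp only [Bool.false_eq_true, if_false]
      omega

-- gAux over an all-true run adds its length
theorem gAux_run_true (run : List Char) : ∀ (rest : List Char) (count : Int),
    (∀ c ∈ run, altKey c = true) → gAux count (run ++ rest) = gAux (count + run.length) rest := by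
  induction run with
  | nil => intro rest count _; simp
  | cons c t ih =>
    intro rest count hall
    have hc := hall c (by simp)
    rw [List.cons_append, gAux, hc, if_pos rfl, ih rest (count + 1) (fun x hx => hall x (by simp [hx]))]
    congr 1
    simp
    omega

-- B's loop computes max best (gAux 0 l) for 0 ≤ best
theorem altGo_eq (l : List Char) (best : Int) (h : 0 ≤ best) :
    altGo l best = max best (gAux 0 l) := by
  match l with
  | [] => simp [altGo, gAux]; omega
  | c :: t =>
    by_cases hk : altKey c
    · rw [altGo, if_pos hk,
        altGo_eq (t.dropWhile altKey) (max best (1 + ↑(t.takeWhile altKey).length)) (by positivity)]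
      have hsplit : t = t.takeWhile altKey ++ t.dropWhile altKey := (List.takeWhile_append_dropWhile).symm
      have hrun : gAux 0 (c :: t) = gAux (1 + (t.takeWhile altKey).length) (t.dropWhile altKey) := by
        conv_lhs => rw [hsplit]
        rw [gAux, hk, if_pos rfl,
          gAux_run_true (t.takeWhile altKey) (t.dropWhile altKey) (0 + 1)
            (fun x hx => List.mem_takeWhile_imp hx)]
        norm_num
      rw [hrun]
      rcases hdrop : t.dropWhile altKey with _ | ⟨d, t2⟩
      · simp [gAux]; omega
      · have hd : altKey d = false := by
          have := List.head?_dropWhile_not altKey t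
          rw [hdrop] at this
          simpa using this
        rw [gAux, hd, gAux, hd]
        simp only [Bool.false_eq_true, if_false]
        have h1 := gAux_ge t2 (0 : Int)
        have h2 : (0:Int) ≤ (t.takeWhile altKey).length := by positivity
        omega
    · have hk' : altKey c = false := by simpa using hk
      rw [altGo, if_neg hk, altGo_eq t best h, gAux, hk']
      simp only [Bool.false_eq_true, if_false]
      have := gAux_ge t (0 : Int)
      omega
termination_by l.length
decreasing_by
  · simpa using Nat.lt_succ_of_le (List.length_dropWhile_le altKey t)
  · simp

-- ===== VERDICT (by name: the statement is the Claim_ definition above) =====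
theorem atcoder_spec : Claim_equal_atcoder := by
  intro s _
  unfold Spec_atcoder atcoder atcoder_alt
  rw [foldA_eq s.toList 0 0 le_rfl le_rfl, altGo_eq s.toList 0 le_rfl]
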